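-- pv_equiv track=rewrite | github.com/RayneDance/tic-tac-toe | tictactoeengine.py | checkMoves
-- ===== SOURCE A (Python) =====
-- def checkMoves(moves):
--
--     grid = []
--     for i in range(10):
--         grid.append(0)
--
--     for i in moves:
--         if i == "topleft":
--             grid[0] = 1
--         elif i == "topmid":
--             grid[1] = 1
--         elif i == "topright":
--             grid[2] = 1
--         elif i == "midleft":
--             grid[3] = 1
--         elif i == "midmid":
--             grid[4] = 1
--         elif i == "midright":
--             grid[5] = 1
--         elif i == "botleft":
--             grid[6] = 1
--         elif i == "botmid":
--             grid[7] = 1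
--         elif i == "botright":
--             grid[8] = 1
--
--     if grid[0]:
--         if grid[1] and grid[2]:
--             return True
--         elif grid[3] and grid[6]:
--             return True
--         elif grid[4] and grid[8]:
--             return True
--
--     if grid[4]:
--         if grid[3] and grid[5]:
--             return True
--         elif grid[1] and grid[7]:
--             return True
--         elif grid[2] and grid[6]:
--             return True
--
--     if grid[6] and grid[7] and grid[8]:
--         return True
--     if grid[2] and grid[5] and grid [8]:
--         return True
--
--     return False
-- ===== SOURCE B (Python) =====
-- # Magic-square formulation: cells carry the 3x3 magic-square numbers (rows/cols/
-- # diagonals are exactly the distinct triples summing to 15), so a win is "some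
-- # three distinct occupied magic values sum to 15" -- no table of winning lines.
-- MAGIC = {"topleft": 2, "topmid": 9, "topright": 4,
--          "midleft": 7, "midmid": 5, "midright": 3,
--          "botleft": 6, "botmid": 1, "botright": 8}
--
-- def checkMoves(moves):
--     vals = sorted({MAGIC[m] for m in moves if m in MAGIC})
--     n = len(vals)
--     for i in range(n):
--         for j in range(i + 1, n):
--             for k in range(j + 1, n):
--                 if vals[i] + vals[j] + vals[k] == 15:
--                     return True
--     return False
-- ===== Notes on version B (the rewrite author's own statement) =====
-- stated objective: alternative
-- what changed: Replaced the grid array with its hard-coded nested win branches by the 3x3 magic-square encoding: moves map to magic numbers 1-9 and a win is detected as three distinct occupied values summing to 15 via a triple loop over the sorted occupied values, with no table or enumeration of winning lines at all.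
import Mathlib
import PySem

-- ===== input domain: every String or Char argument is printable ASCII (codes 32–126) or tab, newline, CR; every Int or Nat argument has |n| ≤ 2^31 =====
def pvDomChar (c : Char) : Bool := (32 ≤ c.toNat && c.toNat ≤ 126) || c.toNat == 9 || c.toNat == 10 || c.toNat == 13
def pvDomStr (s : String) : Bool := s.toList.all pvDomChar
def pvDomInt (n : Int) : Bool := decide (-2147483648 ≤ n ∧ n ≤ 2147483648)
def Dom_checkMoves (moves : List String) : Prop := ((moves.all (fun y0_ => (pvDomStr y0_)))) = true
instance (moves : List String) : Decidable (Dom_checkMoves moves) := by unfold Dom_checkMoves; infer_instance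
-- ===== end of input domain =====

-- B replaces A's grid array + hard-coded nested win branches by the 3x3 magic-square
-- encoding: moves map to magic numbers 1..9 and a win is "three distinct occupied
-- values sum to 15" (a triple loop), with no table of winning lines (alternative).

-- ===== PORT A =====
-- the move→grid elif chain of A, one step of the 'for i in moves' loop
def gridStepA (g : List Int) (i : String) : List Int :=
  if i == "topleft" then PySem.List.pySetD g 0 1
  else if i == "topmid" then PySem.List.pySetD g 1 1
  else if i == "topright" then PySem.List.pySetD g 2 1
  else if i == "midleft" then PySem.List.pySetD g 3 1
  else if i == "midmid" then PySem.List.pySetD g 4 1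
  else if i == "midright" then PySem.List.pySetD g 5 1
  else if i == "botleft" then PySem.List.pySetD g 6 1
  else if i == "botmid" then PySem.List.pySetD g 7 1
  else if i == "botright" then PySem.List.pySetD g 8 1
  else g

def checkMoves (moves : List String) : Bool :=
  let grid0 := (PySem.List.pyRange 0 10 1).foldl (fun g _ => g ++ [(0 : Int)]) []
  let grid := moves.foldl gridStepA grid0
  let t : Int → Bool := fun k => PySem.List.pyGetD grid k 0 != 0
  -- A's early-return elif chains rendered as nested ifs / ||
  if t 0 && (t 1 && t 2 || t 3 && t 6 || t 4 && t 8) then true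
  else if t 4 && (t 3 && t 5 || t 1 && t 7 || t 2 && t 6) then true
  else if t 6 && t 7 && t 8 then true
  else if t 2 && t 5 && t 8 then true
  else false

-- ===== PORT B =====
def MAGIC : PySem.Dict String Int :=
  PySem.Dict.ofList [("topleft", 2), ("topmid", 9), ("topright", 4),
                     ("midleft", 7), ("midmid", 5), ("midright", 3),
                     ("botleft", 6), ("botmid", 1), ("botright", 8)]

def checkMoves_alt (moves : List String) : Bool :=
  -- vals = sorted({MAGIC[m] for m in moves if m in MAGIC})
  let vals : List Int :=
    PySem.List.sorted
      (PySem.Set.ofList ((moves.filter (fun m => MAGIC.contains m)).map (fun m => MAGIC.getD m 0)))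
      (fun x => x) false
  let n : Int := vals.length
  -- triple index loop with early return True = nested any
  (PySem.List.pyRange 0 n 1).any (fun i =>
    (PySem.List.pyRange (i + 1) n 1).any (fun j =>
      (PySem.List.pyRange (j + 1) n 1).any (fun k =>
        PySem.List.pyGetD vals i 0 + PySem.List.pyGetD vals j 0 + PySem.List.pyGetD vals k 0 == 15)))

-- ===== PRECONDITION & SPEC =====
def Spec_checkMoves (moves : List String) (out : Bool) : Prop := out = checkMoves_alt moves
instance (moves : List String) (out : Bool) : Decidable (Spec_checkMoves moves out) := by unfold Spec_checkMoves; infer_instance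

-- ===== CLAIM (what is proved, stated in full; the proofs are below) =====
def Claim_equal_checkMoves : Prop := ∀ (moves : List String), Dom_checkMoves moves → Spec_checkMoves moves (checkMoves moves)

-- ===== LEMMAS AND PROOFS =====

-- proof-side index of the cell a move name addresses (the grid slot A writes)
def idxOf (m : String) : Option Int :=
  if "topleft" = m then some 0 else if "topmid" = m then some 1 else
  if "topright" = m then some 2 else if "midleft" = m then some 3 else
  if "midmid" = m then some 4 else if "midright" = m then some 5 else
  if "botleft" = m then some 6 else if "botmid" = m then some 7 else
  if "botright" = m then some 8 else none

theorem MAGIC_eq : MAGIC = PySem.Dict.mk [("topleft", 2), ("topmid", 9), ("topright", 4),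
                     ("midleft", 7), ("midmid", 5), ("midright", 3),
                     ("botleft", 6), ("botmid", 1), ("botright", 8)] := by decide

theorem magic_get (m : String) : MAGIC.get? m =
    (if "topleft" = m then some 2 else if "topmid" = m then some 9 else
     if "topright" = m then some 4 else if "midleft" = m then some 7 else
     if "midmid" = m then some 5 else if "midright" = m then some 3 else
     if "botleft" = m then some 6 else if "botmid" = m then some 1 else
     if "botright" = m then some 8 else none) := by
  simp only [MAGIC_eq, PySem.Dict.get?_mk_cons, beq_iff_eq]
  rfl

theorem magic_range (m : String) (v : Int) (h : MAGIC.get? m = some v) :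
    v ∈ ([1,2,3,4,5,6,7,8,9] : List Int) := by
  rw [magic_get] at h
  split_ifs at h <;> simp_all

-- the bridge between B's magic value and A's cell index, per cell
theorem bridge0 (m : String) : (MAGIC.get? m == some 2) = (idxOf m == some 0) := by
  rw [magic_get]; unfold idxOf; split_ifs <;> rfl
theorem bridge1 (m : String) : (MAGIC.get? m == some 9) = (idxOf m == some 1) := by
  rw [magic_get]; unfold idxOf; split_ifs <;> rfl
theorem bridge2 (m : String) : (MAGIC.get? m == some 4) = (idxOf m == some 2) := by
  rw [magic_get]; unfold idxOf; split_ifs <;> rfl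
theorem bridge3 (m : String) : (MAGIC.get? m == some 7) = (idxOf m == some 3) := by
  rw [magic_get]; unfold idxOf; split_ifs <;> rfl
theorem bridge4 (m : String) : (MAGIC.get? m == some 5) = (idxOf m == some 4) := by
  rw [magic_get]; unfold idxOf; split_ifs <;> rfl
theorem bridge5 (m : String) : (MAGIC.get? m == some 3) = (idxOf m == some 5) := by
  rw [magic_get]; unfold idxOf; split_ifs <;> rfl
theorem bridge6 (m : String) : (MAGIC.get? m == some 6) = (idxOf m == some 6) := by
  rw [magic_get]; unfold idxOf; split_ifs <;> rfl
theorem bridge7 (m : String) : (MAGIC.get? m == some 1) = (idxOf m == some 7) := by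
  rw [magic_get]; unfold idxOf; split_ifs <;> rfl
theorem bridge8 (m : String) : (MAGIC.get? m == some 8) = (idxOf m == some 8) := by
  rw [magic_get]; unfold idxOf; split_ifs <;> rfl

-- === A side: the grid fold, cell by cell ===
theorem getD_setD (g : List Int) (j k : Int) (hg : g.length = 10) (hj0 : 0 ≤ j)
    (hj : j < 10) (hk0 : 0 ≤ k) :
    PySem.List.pyGetD (PySem.List.pySetD g j 1) k 0 =
      if some j == some k then (1 : Int) else PySem.List.pyGetD g k 0 := by
  obtain ⟨n, rfl⟩ := Int.eq_ofNat_of_zero_le hj0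
  obtain ⟨kn, rfl⟩ := Int.eq_ofNat_of_zero_le hk0
  rw [PySem.List.pyGetD_pySetD_natCast g n kn 1 0 (by omega)]
  by_cases hk : kn = n
  · simp [hk]
  · have hk' : ¬ n = kn := fun hh => hk hh.symm
    simp [hk, hk']

theorem stepA_getD (g : List Int) (m : String) (k : Int)
    (hg : g.length = 10) (h0 : 0 ≤ k) (_h9 : k < 9) :
    PySem.List.pyGetD (gridStepA g m) k 0 =
      if idxOf m == some k then 1 else PySem.List.pyGetD g k 0 := by
  by_cases hn0 : m = "topleft"
  · subst hn0
    rw [show gridStepA g "topleft" = PySem.List.pySetD g 0 1 from by simp [gridStepA],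
        show idxOf "topleft" = some 0 from rfl]
    exact getD_setD g 0 k hg (by decide) (by decide) h0
  by_cases hn1 : m = "topmid"
  · subst hn1
    rw [show gridStepA g "topmid" = PySem.List.pySetD g 1 1 from by simp [gridStepA],
        show idxOf "topmid" = some 1 from rfl]
    exact getD_setD g 1 k hg (by decide) (by decide) h0
  by_cases hn2 : m = "topright"
  · subst hn2
    rw [show gridStepA g "topright" = PySem.List.pySetD g 2 1 from by simp [gridStepA],
        show idxOf "topright" = some 2 from rfl]
    exact getD_setD g 2 k hg (by decide) (by decide) h0
  by_cases hn3 : m = "midleft"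
  · subst hn3
    rw [show gridStepA g "midleft" = PySem.List.pySetD g 3 1 from by simp [gridStepA],
        show idxOf "midleft" = some 3 from rfl]
    exact getD_setD g 3 k hg (by decide) (by decide) h0
  by_cases hn4 : m = "midmid"
  · subst hn4
    rw [show gridStepA g "midmid" = PySem.List.pySetD g 4 1 from by simp [gridStepA],
        show idxOf "midmid" = some 4 from rfl]
    exact getD_setD g 4 k hg (by decide) (by decide) h0
  by_cases hn5 : m = "midright"
  · subst hn5
    rw [show gridStepA g "midright" = PySem.List.pySetD g 5 1 from by simp [gridStepA],
        show idxOf "midright" = some 5 from rfl]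
    exact getD_setD g 5 k hg (by decide) (by decide) h0
  by_cases hn6 : m = "botleft"
  · subst hn6
    rw [show gridStepA g "botleft" = PySem.List.pySetD g 6 1 from by simp [gridStepA],
        show idxOf "botleft" = some 6 from rfl]
    exact getD_setD g 6 k hg (by decide) (by decide) h0
  by_cases hn7 : m = "botmid"
  · subst hn7
    rw [show gridStepA g "botmid" = PySem.List.pySetD g 7 1 from by simp [gridStepA],
        show idxOf "botmid" = some 7 from rfl]
    exact getD_setD g 7 k hg (by decide) (by decide) h0
  by_cases hn8 : m = "botright"
  · subst hn8
    rw [show gridStepA g "botright" = PySem.List.pySetD g 8 1 from by simp [gridStepA],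
        show idxOf "botright" = some 8 from rfl]
    exact getD_setD g 8 k hg (by decide) (by decide) h0
  rw [show idxOf m = none from by
        simp [idxOf, eq_comm, hn0, hn1, hn2, hn3, hn4, hn5, hn6, hn7, hn8],
      show gridStepA g m = g from by
        simp [gridStepA, beq_iff_eq, hn0, hn1, hn2, hn3, hn4, hn5, hn6, hn7, hn8]]
  simp

theorem stepA_len (g : List Int) (m : String) : (gridStepA g m).length = g.length := by
  unfold gridStepA
  split_ifs <;> simp [PySem.List.length_pySetD]

theorem foldA_getD (ms : List String) (g : List Int) (k : Int)
    (hg : g.length = 10) (h0 : 0 ≤ k) (_h9 : k < 9) :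
    PySem.List.pyGetD (ms.foldl gridStepA g) k 0 =
      if ms.any (fun m => idxOf m == some k) then 1 else PySem.List.pyGetD g k 0 := by
  induction ms generalizing g with
  | nil => simp
  | cons m ms ih =>
    rw [List.foldl_cons, ih _ (by rw [stepA_len, hg]),
        stepA_getD g m k hg h0 _h9]
    by_cases hm : (idxOf m == some k) = true <;> simp [hm]

theorem tA (moves : List String) (k : Int) (h0 : 0 ≤ k) (h9 : k < 9)
    (hz : PySem.List.pyGetD ((PySem.List.pyRange 0 10 1).foldl (fun g _ => g ++ [(0 : Int)]) []) k 0 = 0) :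
    (PySem.List.pyGetD
        (moves.foldl gridStepA ((PySem.List.pyRange 0 10 1).foldl (fun g _ => g ++ [(0 : Int)]) [])) k 0 != 0)
      = moves.any (fun m => idxOf m == some k) := by
  rw [foldA_getD _ _ _ (by decide) h0 h9, hz]
  by_cases hb : moves.any (fun m => idxOf m == some k) = true <;> simp [hb]

-- === B side: the occupied magic values, sorted ===
theorem mem_occ (moves : List String) (v : Int) :
    v ∈ PySem.Set.ofList
          ((moves.filter (fun m => MAGIC.contains m)).map (fun m => MAGIC.getD m 0))
      ↔ moves.any (fun m => MAGIC.get? m == some v) = true := by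
  rw [PySem.Set.mem_ofList, List.mem_map, List.any_eq_true]
  constructor
  · rintro ⟨m, hm, hv⟩
    rw [List.mem_filter] at hm
    refine ⟨m, hm.1, ?_⟩
    have hc := hm.2
    rw [PySem.Dict.contains_eq_isSome_get?] at hc
    cases hq : MAGIC.get? m with
    | none => rw [hq] at hc; simp at hc
    | some w =>
      rw [PySem.Dict.getD_of_get?_eq_some MAGIC 0 hq] at hv
      simp [hv]
  · rintro ⟨m, hm, hv⟩
    rw [beq_iff_eq] at hv
    refine ⟨m, ?_, PySem.Dict.getD_of_get?_eq_some MAGIC 0 hv⟩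
    rw [List.mem_filter]
    exact ⟨hm, by rw [PySem.Dict.contains_eq_isSome_get?, hv]; rfl⟩

theorem vals_eq (moves : List String) :
    PySem.List.sorted
      (PySem.Set.ofList ((moves.filter (fun m => MAGIC.contains m)).map (fun m => MAGIC.getD m 0)))
      (fun x => x) false
    = ([1,2,3,4,5,6,7,8,9] : List Int).filter
        (fun v => moves.any (fun m => MAGIC.get? m == some v)) := by
  apply PySem.List.sorted_eq_of_perm_of_pairwise_lt
  · rw [List.perm_ext_iff_of_nodup
      ((by decide : ([1,2,3,4,5,6,7,8,9] : List Int).Nodup).filter _)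
      (PySem.Set.nodup_ofList _)]
    intro v
    rw [List.mem_filter, mem_occ]
    constructor
    · exact fun h => h.2
    · intro h
      refine ⟨?_, h⟩
      rw [List.any_eq_true] at h
      obtain ⟨m, _, hv⟩ := h
      exact magic_range m v (by rwa [beq_iff_eq] at hv)
  · exact (by decide : ([1,2,3,4,5,6,7,8,9] : List Int).Pairwise (· < ·)).filter _

-- ===== VERDICT (by name: the statement is the Claim_ definition above) =====
theorem checkMoves_spec : Claim_equal_checkMoves := by
  intro moves _
  show checkMoves moves = checkMoves_alt moves
  simp only [checkMoves, checkMoves_alt, vals_eq, List.filter_cons, List.filter_nil]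
  simp only [tA moves 0 (by decide) (by decide) (by decide),
      tA moves 1 (by decide) (by decide) (by decide),
      tA moves 2 (by decide) (by decide) (by decide),
      tA moves 3 (by decide) (by decide) (by decide),
      tA moves 4 (by decide) (by decide) (by decide),
      tA moves 5 (by decide) (by decide) (by decide),
      tA moves 6 (by decide) (by decide) (by decide),
      tA moves 7 (by decide) (by decide) (by decide),
      tA moves 8 (by decide) (by decide) (by decide),
      bridge0, bridge1, bridge2, bridge3, bridge4, bridge5, bridge6, bridge7, bridge8]
  generalize moves.any (fun m => idxOf m == some 0) = b0
  generalize moves.any (fun m => idxOf m == some 1) = b1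
  generalize moves.any (fun m => idxOf m == some 2) = b2
  generalize moves.any (fun m => idxOf m == some 3) = b3
  generalize moves.any (fun m => idxOf m == some 4) = b4
  generalize moves.any (fun m => idxOf m == some 5) = b5
  generalize moves.any (fun m => idxOf m == some 6) = b6
  generalize moves.any (fun m => idxOf m == some 7) = b7
  generalize moves.any (fun m => idxOf m == some 8) = b8
  revert b0 b1 b2 b3 b4 b5 b6 b7 b8
  decide
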